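-- pv_equiv track=rewrite | github.com/huanghaodong1997/lc | C3AI/vo/sheetmetal.py | dp_max_profit
-- ===== SOURCE A (Python) =====
-- def dp_max_profit(width, height, values):
--     dp = [[0] * (height + 1) for _ in range(width + 1)]
--     dp[1][1] = values[1]
--
--     for i in range(1, width + 1):
--         for j in range(1, height + 1):
--             if i == j:
--                 dp[i][j] = values[i]
--             for p in range(1, i):
--                 dp[i][j] = max(dp[i][j], dp[p][j] + dp[i - p][j])
--             for q in range(1, j):
--                 dp[i][j] = max(dp[i][j], dp[i][q] + dp[i][j - q])
--     return dp[width][height]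
-- ===== SOURCE B (Python) =====
-- def dp_max_profit(width, height, values):
--     # Top-down divide-and-conquer over split points, memoized in the dp table,
--     # instead of A's bottom-up triple-loop sweep.  A's prelude is kept as-is:
--     # it allocates the memo table and seeds dp[1][1].
--     dp = [[0] * (height + 1) for _ in range(width + 1)]
--     dp[1][1] = values[1]
--     seen = {(1, 1)}
--
--     def solve(i, j):
--         if (i, j) not in seen:
--             best = values[i] if i == j else 0
--             for p in range(1, i):
--                 best = max(best, solve(p, j) + solve(i - p, j))
--             for q in range(1, j):
--                 best = max(best, solve(i, q) + solve(i, j - q))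
--             dp[i][j] = best
--             seen.add((i, j))
--         return dp[i][j]
--
--     return solve(width, height)
-- ===== Notes on version B (the rewrite author's own statement) =====
-- stated objective: alternative
-- what changed: Replaces A's bottom-up triple-loop table sweep with a top-down divide-and-conquer recursion over split points memoized in the dp table (A's prelude kept, so it returns and raises exactly where A does).
import Mathlib
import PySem

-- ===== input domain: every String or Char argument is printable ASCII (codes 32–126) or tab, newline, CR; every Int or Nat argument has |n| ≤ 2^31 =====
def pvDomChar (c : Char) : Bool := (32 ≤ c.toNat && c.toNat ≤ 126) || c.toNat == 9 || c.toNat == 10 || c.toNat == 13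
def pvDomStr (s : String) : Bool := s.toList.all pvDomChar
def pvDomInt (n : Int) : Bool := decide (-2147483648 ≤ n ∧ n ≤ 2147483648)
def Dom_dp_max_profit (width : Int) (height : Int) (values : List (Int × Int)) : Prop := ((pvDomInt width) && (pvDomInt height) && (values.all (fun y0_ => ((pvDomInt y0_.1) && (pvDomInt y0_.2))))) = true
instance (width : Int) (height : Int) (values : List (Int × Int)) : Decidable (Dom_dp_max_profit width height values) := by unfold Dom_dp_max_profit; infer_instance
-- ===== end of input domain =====

-- B replaces A's bottom-up table sweep by top-down memoized recursion over split
-- points (same recurrence, divide-and-conquer decomposition); no speed claim.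

-- ===== PORT A =====
-- 2D table helpers: dp[i][j] read (default 0; in range under Pre_) and write.
def tget (dp : List (List Int)) (i j : Nat) : Int := (dp.getD i []).getD j 0
def tset (dp : List (List Int)) (i j : Nat) (v : Int) : List (List Int) :=
  dp.set i ((dp.getD i []).set j v)

-- Literal port of A.  range(1, n+1) over positive bounds is List.range' 1 n on
-- Nat (exact here: Pre_ forces width, height ≥ 1); the Python dict lookups
-- values[1] / values[i] raise KeyError when the key is missing — exactly those
-- inputs (and width < 1 / height < 1, where dp[1][1] = … raises IndexError)
-- are excluded by Pre_, so `(… .get? …).getD 0` is exact on Pre_.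
def dp_max_profit (width : Int) (height : Int) (values : List (Int × Int)) : Int :=
  let w : Nat := width.toNat
  let h : Nat := height.toNat
  let dp0 := List.replicate (w + 1) (List.replicate (h + 1) (0 : Int))
  let dp1 := tset dp0 1 1 ((PySem.Dict.get? (PySem.Dict.mk values) 1).getD 0)
  let dp :=
    (List.range' 1 w).foldl (fun dp i =>
      (List.range' 1 h).foldl (fun dp j =>
        let dp := if i = j then tset dp i j ((PySem.Dict.get? (PySem.Dict.mk values) (i : Int)).getD 0) else dp
        let dp := (List.range' 1 (i - 1)).foldl (fun dp p =>
          tset dp i j (max (tget dp i j) (tget dp p j + tget dp (i - p) j))) dp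
        (List.range' 1 (j - 1)).foldl (fun dp q =>
          tset dp i j (max (tget dp i j) (tget dp i q + tget dp i (j - q)))) dp) dp) dp1
  tget dp w h

-- ===== PORT B =====
-- Port of Source B's recursive solve(i, j).  Source B's dp table + seen set form a memo
-- cache of solve's own values (the seeded dp[1][1] = values[1] is solve's value
-- at (1,1)); the port computes the same recursion without the cache.  Source B's
-- prelude (table allocation, values[1]) only raises outside Pre_, where Pre_
-- forces width, height ≥ 1, so range(1, i) is List.range' 1 (i - 1) on Nat.
def solveB (values : List (Int × Int)) (i j : Nat) : Int :=
  let base : Int := if i = j then (PySem.Dict.get? (PySem.Dict.mk values) (i : Int)).getD 0 else 0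
  let b1 := (List.range' 1 (i - 1)).attach.foldl
    (fun b p => max b (solveB values p.1 j + solveB values (i - p.1) j)) base
  (List.range' 1 (j - 1)).attach.foldl
    (fun b q => max b (solveB values i q.1 + solveB values i (j - q.1))) b1
termination_by i + j
decreasing_by
  · have := List.mem_range'.mp p.2; omega
  · have := List.mem_range'.mp p.2; omega
  · have := List.mem_range'.mp q.2; omega
  · have := List.mem_range'.mp q.2; omega

def dp_max_profit_alt (width : Int) (height : Int) (values : List (Int × Int)) : Int :=
  solveB values width.toNat height.toNat

-- ===== PRECONDITION & SPEC =====
-- Pre_: exactly where Python A returns: width, height ≥ 1 (else the prelude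
-- dp[1][1] = values[1] raises IndexError) and every key 1..min(width, height)
-- present in values (else values[1] / values[i] at i == j raises KeyError).
-- (all keys 1..m present forces m ≤ values.length, so bounding the quantifier's
-- range by values.length keeps the same condition while staying cheap to decide)
def Pre_dp_max_profit (width : Int) (height : Int) (values : List (Int × Int)) : Prop :=
  1 ≤ width ∧ 1 ≤ height ∧
    min width.toNat height.toNat ≤ values.length ∧
    ∀ i ∈ List.range' 1 (min (min width.toNat height.toNat) values.length),
      (PySem.Dict.get? (PySem.Dict.mk values) (i : Int)).isSome = true
instance (width : Int) (height : Int) (values : List (Int × Int)) : Decidable (Pre_dp_max_profit width height values) := by unfold Pre_dp_max_profit; infer_instance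
def pvWitness_dp_max_profit : Int × Int × (List (Int × Int)) := (2, 3, [(1, 4), (2, -1)])

def Spec_dp_max_profit (width : Int) (height : Int) (values : List (Int × Int)) (out : Int) : Prop := out = dp_max_profit_alt width height values
instance (width : Int) (height : Int) (values : List (Int × Int)) (out : Int) : Decidable (Spec_dp_max_profit width height values out) := by unfold Spec_dp_max_profit; infer_instance

-- ===== CLAIM (what is proved, stated in full; the proofs are below) =====
def Claim_equal_dp_max_profit : Prop := ∀ (width : Int) (height : Int) (values : List (Int × Int)), Dom_dp_max_profit width height values → Pre_dp_max_profit width height values → Spec_dp_max_profit width height values (dp_max_profit width height values)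

-- ===== LEMMAS AND PROOFS =====

-- solveB unfolded, with the attach-folds replaced by plain folds.
theorem solveB_eq (values : List (Int × Int)) (i j : Nat) :
    solveB values i j =
      (List.range' 1 (j - 1)).foldl
        (fun b q => max b (solveB values i q + solveB values i (j - q)))
        ((List.range' 1 (i - 1)).foldl
          (fun b p => max b (solveB values p j + solveB values (i - p) j))
          (if i = j then (PySem.Dict.get? (PySem.Dict.mk values) (i : Int)).getD 0 else 0)) := by
  rw [solveB]
  have h1 : ∀ b : Int, (List.range' 1 (i - 1)).attach.foldl
      (fun b p => max b (solveB values p.1 j + solveB values (i - p.1) j)) b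
      = (List.range' 1 (i - 1)).foldl
      (fun b p => max b (solveB values p j + solveB values (i - p) j)) b :=
    fun b => List.foldl_attach (l := List.range' 1 (i - 1))
      (f := fun b p => max b (solveB values p j + solveB values (i - p) j)) (b := b)
  have h2 : ∀ b : Int, (List.range' 1 (j - 1)).attach.foldl
      (fun b q => max b (solveB values i q.1 + solveB values i (j - q.1))) b
      = (List.range' 1 (j - 1)).foldl
      (fun b q => max b (solveB values i q + solveB values i (j - q))) b :=
    fun b => List.foldl_attach (l := List.range' 1 (j - 1))
      (f := fun b q => max b (solveB values i q + solveB values i (j - q))) (b := b)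
  rw [h1, h2]

-- table helper facts -----------------------------------------------------------

theorem tget_tset_same (T : List (List Int)) (i j : Nat) (v : Int)
    (hi : i < T.length) (hj : j < (T.getD i []).length) :
    tget (tset T i j v) i j = v := by
  unfold tget tset
  simp only [List.getD] at hj
  simp only [List.getD]
  rw [List.getElem?_set_self hi]
  simp only [Option.getD_some]
  rw [List.getElem?_set_self hj]
  simp

theorem tget_tset_other (T : List (List Int)) (i j a b : Nat) (v : Int)
    (h : a ≠ i ∨ b ≠ j) :
    tget (tset T i j v) a b = tget T a b := by
  unfold tget tset
  simp only [List.getD]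
  rcases eq_or_ne a i with rfl | hne
  · rcases h with h | h
    · exact absurd rfl h
    · by_cases hi : a < T.length
      · rw [List.getElem?_set_self hi]
        simp [List.getElem?_set_ne (Ne.symm h)]
      · simp [hi]
  · rw [List.getElem?_set_ne (Ne.symm hne)]

theorem tset_tset (T : List (List Int)) (i j : Nat) (v w : Int)
    (hi : i < T.length) :
    tset (tset T i j v) i j w = tset T i j w := by
  unfold tset
  rw [List.set_set]
  congr 1
  simp only [List.getD]
  rw [List.getElem?_set_self hi]
  simp [List.set_set]

theorem tset_self (T : List (List Int)) (i j : Nat)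
    (hi : i < T.length) (hj : j < (T.getD i []).length) :
    tset T i j (tget T i j) = T := by
  unfold tset tget
  have h1 : T.getD i [] = T[i] := by simp [List.getD, List.getElem?_eq_getElem hi]
  rw [h1] at hj ⊢
  have h2 : T[i].getD j 0 = T[i][j] := by simp [List.getD, List.getElem?_eq_getElem hj]
  rw [h2, List.set_getElem_self, List.set_getElem_self]

theorem length_tset (T : List (List Int)) (i j : Nat) (v : Int) :
    (tset T i j v).length = T.length := by simp [tset]

theorem rowlen_tset (T : List (List Int)) (i j : Nat) (v : Int) (a : Nat) :
    ((tset T i j v).getD a []).length = (T.getD a []).length := by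
  unfold tset
  simp only [List.getD]
  rcases eq_or_ne a i with rfl | hne
  · by_cases hi : a < T.length
    · rw [List.getElem?_set_self hi]
      simp
    · simp [hi]
  · rw [List.getElem?_set_ne (Ne.symm hne)]

-- well-formedness of the table
def WF (w h : Nat) (T : List (List Int)) : Prop :=
  T.length = w + 1 ∧ ∀ a : Nat, (T.getD a []).length = if a < w + 1 then h + 1 else 0

theorem WF_tset (w h : Nat) (T : List (List Int)) (i j : Nat) (v : Int)
    (hT : WF w h T) : WF w h (tset T i j v) := by
  obtain ⟨h1, h2⟩ := hT
  exact ⟨by rw [length_tset, h1], fun a => by rw [rowlen_tset]; exact h2 a⟩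

-- the running-max fold over the current cell, as a pure fold over the old table
theorem fold_tset_max (w h : Nat) (T : List (List Int)) (i j : Nat)
    (hT : WF w h T) (hi : i < w + 1) (hj : j < h + 1)
    (g : List (List Int) → Nat → Int) (l : List Nat)
    (hg : ∀ v p, p ∈ l → g (tset T i j v) p = g T p) :
    ∀ c : Int,
      l.foldl (fun dp p => tset dp i j (max (tget dp i j) (g dp p))) (tset T i j c)
        = tset T i j (l.foldl (fun c p => max c (g T p)) c) := by
  have hiT : i < T.length := by rw [hT.1]; exact hi
  have hjT : j < (T.getD i []).length := by rw [hT.2 i, if_pos hi]; exact hj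
  induction l with
  | nil => intro c; rfl
  | cons p rest ih =>
    intro c
    have := ih (fun v q hq => hg v q (List.mem_cons_of_mem _ hq))
    simp only [List.foldl_cons]
    rw [tget_tset_same T i j c hiT hjT, hg c p List.mem_cons_self,
      tset_tset T i j c _ hiT, this]

-- one cell: starting from a table whose processed cells hold solveB and whose
-- later diagonal-free cells hold 0, the cell body writes solveB i j.
theorem cell_step (w h : Nat) (values : List (Int × Int)) (T : List (List Int)) (i j : Nat)
    (hT : WF w h T) (hi1 : 1 ≤ i) (hiw : i ≤ w) (hj1 : 1 ≤ j) (hjh : j ≤ h)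
    (hdone : ∀ a b : Nat, 1 ≤ a → a ≤ w → 1 ≤ b → b ≤ h →
      (a < i ∨ (a = i ∧ b < j)) → tget T a b = solveB values a b)
    (hzero : tget T i j = 0 ∨ i = j) :
    (let dp := if i = j then tset T i j ((PySem.Dict.get? (PySem.Dict.mk values) (i : Int)).getD 0) else T
     let dp := (List.range' 1 (i - 1)).foldl (fun dp p =>
        tset dp i j (max (tget dp i j) (tget dp p j + tget dp (i - p) j))) dp
     (List.range' 1 (j - 1)).foldl (fun dp q =>
        tset dp i j (max (tget dp i j) (tget dp i q + tget dp i (j - q)))) dp)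
      = tset T i j (solveB values i j) := by
  have hiT : i < T.length := by rw [hT.1]; omega
  have hjT : j < (T.getD i []).length := by rw [hT.2 i, if_pos (by omega)]; omega
  -- starting table is tset T i j base
  set base : Int := if i = j then (PySem.Dict.get? (PySem.Dict.mk values) (i : Int)).getD 0 else 0 with hbase
  have hstart : (if i = j then tset T i j ((PySem.Dict.get? (PySem.Dict.mk values) (i : Int)).getD 0) else T)
      = tset T i j base := by
    by_cases hij : i = j
    · rw [if_pos hij, hbase, if_pos hij]
    · rw [if_neg hij, hbase, if_neg hij]
      have h0 : tget T i j = 0 := by rcases hzero with h | h; exact h; exact absurd h hij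
      rw [← h0, tset_self T i j hiT hjT]
  simp only [hstart]
  -- horizontal fold
  have hg1 : ∀ v p, p ∈ List.range' 1 (i - 1) →
      (fun dp p => tget dp p j + tget dp (i - p) j) (tset T i j v) p
        = (fun dp p => tget dp p j + tget dp (i - p) j) T p := by
    intro v p hp
    have hpr := List.mem_range'.mp hp
    have e1 : tget (tset T i j v) p j = tget T p j :=
      tget_tset_other T i j p j v (Or.inl (by omega))
    have e2 : tget (tset T i j v) (i - p) j = tget T (i - p) j :=
      tget_tset_other T i j (i - p) j v (Or.inl (by omega))
    simp only [e1, e2]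
  rw [fold_tset_max w h T i j hT (by omega) (by omega) _ _ hg1 base]
  -- vertical fold
  have hg2 : ∀ v q, q ∈ List.range' 1 (j - 1) →
      (fun dp q => tget dp i q + tget dp i (j - q)) (tset T i j v) q
        = (fun dp q => tget dp i q + tget dp i (j - q)) T q := by
    intro v q hq
    have hqr := List.mem_range'.mp hq
    have e1 : tget (tset T i j v) i q = tget T i q :=
      tget_tset_other T i j i q v (Or.inr (by omega))
    have e2 : tget (tset T i j v) i (j - q) = tget T i (j - q) :=
      tget_tset_other T i j i (j - q) v (Or.inr (by omega))
    simp only [e1, e2]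
  rw [fold_tset_max w h T i j hT (by omega) (by omega) _ _ hg2]
  -- values read are solveB values of earlier cells
  congr 1
  rw [solveB_eq]
  have hhor :
      (List.range' 1 (i - 1)).foldl (fun c p => max c (tget T p j + tget T (i - p) j)) base
        = (List.range' 1 (i - 1)).foldl (fun c p => max c (solveB values p j + solveB values (i - p) j)) base := by
    apply List.foldl_ext
    intro c p hp
    have hpr := List.mem_range'.mp hp
    rw [hdone p j (by omega) (by omega) (by omega) (by omega) (Or.inl (by omega)),
      hdone (i - p) j (by omega) (by omega) (by omega) (by omega) (Or.inl (by omega))]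
  rw [hhor]
  apply List.foldl_ext
  intro c q hq
  have hqr := List.mem_range'.mp hq
  rw [hdone i q (by omega) (by omega) (by omega) (by omega) (Or.inr ⟨rfl, by omega⟩),
    hdone i (j - q) (by omega) (by omega) (by omega) (by omega) (Or.inr ⟨rfl, by omega⟩)]

-- the full invariant
def Good (w h : Nat) (values : List (Int × Int)) (i j : Nat) (T : List (List Int)) : Prop :=
  (∀ a b : Nat, 1 ≤ a → a ≤ w → 1 ≤ b → b ≤ h →
    ((a < i ∨ (a = i ∧ b < j)) → tget T a b = solveB values a b) ∧
    ((i < a ∨ (a = i ∧ j ≤ b)) → a ≠ b → tget T a b = 0))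

theorem row_step (w h : Nat) (values : List (Int × Int)) (i : Nat)
    (hi1 : 1 ≤ i) (hiw : i ≤ w) :
    ∀ (k j : Nat) (T : List (List Int)), WF w h T → 1 ≤ j → j + k = h + 1 →
      Good w h values i j T →
      WF w h ((List.range' j k).foldl (fun dp j =>
        let dp := if i = j then tset dp i j ((PySem.Dict.get? (PySem.Dict.mk values) (i : Int)).getD 0) else dp
        let dp := (List.range' 1 (i - 1)).foldl (fun dp p =>
          tset dp i j (max (tget dp i j) (tget dp p j + tget dp (i - p) j))) dp
        (List.range' 1 (j - 1)).foldl (fun dp q =>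
          tset dp i j (max (tget dp i j) (tget dp i q + tget dp i (j - q)))) dp) T) ∧
      Good w h values i (j + k) ((List.range' j k).foldl (fun dp j =>
        let dp := if i = j then tset dp i j ((PySem.Dict.get? (PySem.Dict.mk values) (i : Int)).getD 0) else dp
        let dp := (List.range' 1 (i - 1)).foldl (fun dp p =>
          tset dp i j (max (tget dp i j) (tget dp p j + tget dp (i - p) j))) dp
        (List.range' 1 (j - 1)).foldl (fun dp q =>
          tset dp i j (max (tget dp i j) (tget dp i q + tget dp i (j - q)))) dp) T) := by
  intro k
  induction k with
  | zero => intro j T hWF hj1 hjk hG; exact ⟨hWF, hG⟩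
  | succ k ih =>
    intro j T hWF hj1 hjk hG
    rw [List.range'_succ, List.foldl_cons]
    have hstep := cell_step w h values T i j hWF hi1 hiw hj1 (by omega)
      (fun a b ha haw hb hbh hcond => (hG a b ha haw hb hbh).1 hcond)
      (by
        by_cases hij : i = j
        · exact Or.inr hij
        · exact Or.inl ((hG i j hi1 hiw hj1 (by omega)).2 (Or.inr ⟨rfl, le_refl j⟩) hij))
    simp only at hstep
    rw [hstep]
    have hiT : i < T.length := by rw [hWF.1]; omega
    have hjT : j < (T.getD i []).length := by rw [hWF.2 i, if_pos (by omega)]; omega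
    have harr2 : j + (k + 1) = (j + 1) + k := by omega
    rw [harr2]
    apply ih (j + 1) _ (WF_tset w h T i j _ hWF) (by omega) (by omega)
    intro a b ha haw hb hbh
    constructor
    · intro hcond
      rcases eq_or_ne (a, b) (i, j) with heq | hne
      · have : a = i ∧ b = j := Prod.mk.injEq .. ▸ Prod.mk.inj heq
        obtain ⟨rfl, rfl⟩ := this
        exact tget_tset_same T a b _ hiT hjT
      · have hor : a ≠ i ∨ b ≠ j := by
          by_contra hc
          push_neg at hc
          exact hne (by rw [hc.1, hc.2])
        rw [tget_tset_other T i j a b _ hor]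
        apply (hG a b ha haw hb hbh).1
        rcases hcond with h | ⟨rfl, h⟩
        · exact Or.inl h
        · rcases Nat.lt_or_ge b j with h' | h'
          · exact Or.inr ⟨rfl, h'⟩
          · exact absurd (by omega : b = j) (by
              intro hbj
              exact hne (by rw [hbj]))
    · intro hcond hab
      have hor : a ≠ i ∨ b ≠ j := by
        rcases hcond with h | ⟨rfl, h⟩
        · exact Or.inl (by omega)
        · exact Or.inr (by omega)
      rw [tget_tset_other T i j a b _ hor]
      apply (hG a b ha haw hb hbh).2 _ hab
      rcases hcond with h | ⟨rfl, h⟩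
      · exact Or.inl h
      · exact Or.inr ⟨rfl, by omega⟩

theorem Good_next (w h : Nat) (values : List (Int × Int)) (i : Nat)
    (T : List (List Int)) (hG : Good w h values i (1 + h) T) :
    Good w h values (i + 1) 1 T := by
  intro a b ha haw hb hbh
  obtain ⟨h1, h2⟩ := hG a b ha haw hb hbh
  constructor
  · intro hcond
    apply h1
    rcases Nat.lt_or_ge a i with h' | h'
    · exact Or.inl h'
    · exact Or.inr ⟨by omega, by omega⟩
  · intro hcond hab
    exact h2 (Or.inl (by omega)) hab

theorem table_steps (w h : Nat) (values : List (Int × Int)) :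
    ∀ (k i : Nat) (T : List (List Int)), WF w h T → 1 ≤ i → i + k = w + 1 →
      Good w h values i 1 T →
      Good w h values (i + k) 1 ((List.range' i k).foldl (fun dp i =>
        (List.range' 1 h).foldl (fun dp j =>
          let dp := if i = j then tset dp i j ((PySem.Dict.get? (PySem.Dict.mk values) (i : Int)).getD 0) else dp
          let dp := (List.range' 1 (i - 1)).foldl (fun dp p =>
            tset dp i j (max (tget dp i j) (tget dp p j + tget dp (i - p) j))) dp
          (List.range' 1 (j - 1)).foldl (fun dp q =>
            tset dp i j (max (tget dp i j) (tget dp i q + tget dp i (j - q)))) dp) dp) T) := by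
  intro k
  induction k with
  | zero => intro i T hWF hi1 hik hG; exact hG
  | succ k ih =>
    intro i T hWF hi1 hik hG
    rw [List.range'_succ, List.foldl_cons]
    obtain ⟨hWF', hG'⟩ := row_step w h values i hi1 (by omega) h 1 T hWF (le_refl 1) (by omega) hG
    have hG'' := Good_next w h values i _ hG'
    have := ih (i + 1) _ hWF' (by omega) (by omega) hG''
    have harr : i + 1 + k = i + (k + 1) := by omega
    rw [harr] at this
    exact this

theorem tget_replicate (w h a b : Nat) :
    tget (List.replicate (w + 1) (List.replicate (h + 1) (0 : Int))) a b = 0 := by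
  unfold tget
  simp only [List.getD, List.getElem?_replicate]
  split <;> simp

-- ===== VERDICT (by name: the statement is the Claim_ definition above) =====
theorem dp_max_profit_spec : Claim_equal_dp_max_profit := by
  intro width height values _ hPre
  obtain ⟨hw, hh, -, -⟩ := hPre
  unfold Spec_dp_max_profit dp_max_profit dp_max_profit_alt
  set w : Nat := width.toNat with hwdef
  set h : Nat := height.toNat with hhdef
  have hw1 : 1 ≤ w := by omega
  have hh1 : 1 ≤ h := by omega
  set dp0 := List.replicate (w + 1) (List.replicate (h + 1) (0 : Int)) with hdp0
  have hWF0 : WF w h dp0 := by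
    constructor
    · simp [hdp0]
    · intro a
      rcases Nat.lt_or_ge a (w + 1) with ha | ha
      · rw [if_pos ha, hdp0, List.getD, List.getElem?_replicate, if_pos ha]; simp
      · rw [if_neg (by omega), hdp0, List.getD, List.getElem?_replicate, if_neg (by omega)]; rfl
  set dp1 := tset dp0 1 1 ((PySem.Dict.get? (PySem.Dict.mk values) 1).getD 0) with hdp1
  have hWF1 : WF w h dp1 := WF_tset w h dp0 1 1 _ hWF0
  have hG1 : Good w h values 1 1 dp1 := by
    intro a b ha haw hb hbh
    constructor
    · intro hcond; omega
    · intro hcond hab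
      have hor : a ≠ 1 ∨ b ≠ 1 := by
        by_cases h1 : a = 1
        · exact Or.inr (by omega)
        · exact Or.inl h1
      rw [hdp1, tget_tset_other dp0 1 1 a b _ hor, hdp0, tget_replicate]
  have := table_steps w h values w 1 dp1 hWF1 (le_refl 1) (by omega) hG1
  have hfinal := (this w h hw1 (le_refl w) hh1 (le_refl h)).1 (Or.inl (by omega))
  simp only at hfinal ⊢
  exact hfinal
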